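-- pv_equiv track=rewrite | github.com/danielstp/recopilaSicoes | recolector.py | proord
-- ===== SOURCE A (Python) =====
-- import math
--
-- def proord(A, c, s, w, x):
--     i = len(A)
--     B = s
--     j = 0
--     if (i % 2 == 0):
--         j = math.floor(i / 2) - 1
--     else:
--         j = Math.floor(i / 2)
--     y = 0
--     z = []
--     for u in range(i):
--         z.insert(u,0)
--     for v in range(c, j):
--         for t in range(i):
--             y = y + B
--             if (y >= i):
--                 y = y - i
--             z[t] = A[y]
--         for t in range(i):
--             A[t] = z[t]
--     if ((i == 3 and s == 2) or (i == 4 and s == 3) or (i == 7 and s == 6) or (i == 8 and s == 7) or (i == 12 and s == 11) or (i == 15 and s == 14) or (i == 16 and s == 15) or (i == 19 and s == 18) or (i == 20 and s == 19)):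
--         for u in range(i):
--             z[u] = 0
--             z[u] = A[u]
--         k = 0
--         for t in range(i - 1,-1,-1):
--             A[k] = z[t]
--             k = k + 1
--     if ((i == 3 and s == 1) or (i == 4 and s == 1)):
--         for u in range(i):
--             z[u] = A[u]
--         k = 0
--         A[0] = z[(i - 1)]
--         for t in range( 1, i):
--             A[t] = z[(t - 1)]
--     return A
-- ===== SOURCE B (Python) =====
-- def proord(A, c, s, w, x):
--     # Like the original, mutates A in place and returns it.
--     i = len(A)
--     j = i // 2 - 1 if i % 2 == 0 else i // 2
--     k = max(0, j - c)
--     if i > 0 and k > 0: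
--         # one pass of the original loop is the affine permutation t -> (s*t + s) % i;
--         # its k-th power is t -> (p*t + q) % i with p = s^k, q = s + s^2 + ... + s^k (mod i)
--         p, q = 1, 0
--         for _ in range(k):
--             p, q = (p * s) % i, (p * s + q) % i
--         A[:] = [A[(p * t + q) % i] for t in range(i)]
--     if (i == 4 and s == 3) or (i == 8 and s == 7) or (i == 12 and s == 11) or (i == 16 and s == 15) or (i == 20 and s == 19):
--         A.reverse()
--     if i == 4 and s == 1:
--         A[:] = A[-1:] + A[:-1]
--     return A
-- ===== Notes on version B (the rewrite author's own statement) =====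
-- stated objective: faster
-- what changed: Instead of materialising each of the k = j-c rotation passes with an O(i) inner scan, B observes that one pass is the affine permutation t -> (s*t+s) mod i, computes its k-th power's coefficients (p,q) = (s^k, s+...+s^k) mod i in O(k), and writes the result in a single O(i) pass; the reverse/rotate special cases use list primitives.
import Mathlib
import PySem

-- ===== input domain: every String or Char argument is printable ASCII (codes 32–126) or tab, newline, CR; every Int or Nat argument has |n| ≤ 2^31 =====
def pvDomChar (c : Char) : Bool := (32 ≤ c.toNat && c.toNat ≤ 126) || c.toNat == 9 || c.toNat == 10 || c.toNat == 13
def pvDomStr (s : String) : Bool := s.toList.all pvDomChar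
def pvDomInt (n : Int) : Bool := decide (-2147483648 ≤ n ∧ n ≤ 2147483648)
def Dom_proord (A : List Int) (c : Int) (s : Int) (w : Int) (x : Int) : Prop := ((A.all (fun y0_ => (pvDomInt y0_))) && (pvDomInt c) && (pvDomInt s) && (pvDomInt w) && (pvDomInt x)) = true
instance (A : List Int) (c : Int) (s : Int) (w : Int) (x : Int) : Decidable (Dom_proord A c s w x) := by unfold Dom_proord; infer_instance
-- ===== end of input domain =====

-- B computes the k-th power of the per-pass rotation permutation in closed form (O(k+i) instead of
-- O(k*i)); both programs, like the Python, are about the RETURN value (Python A and B mutate A in place).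

-- ===== PORT A =====
-- xs[m] (Python indexing, possibly negative); always in range under Pre_proord
def pvIdx (xs : List Int) (m : Int) : Int := (PySem.List.pyGet? xs m).getD 0

-- body of 'for t in range(i)': y = y + B; if y >= i: y = y - i; z[t] = A[y]
def pvInnerStep (Acur : List Int) (i B : Int) (st : List Int × Int) (t : Nat) : List Int × Int :=
  let y1 := st.2 + B
  let y2 := if i ≤ y1 then y1 - i else y1
  (st.1.set t (pvIdx Acur y2), y2)

-- body of 'for v in range(c, j)': inner loop over t, then A[t] = z[t] for all t
def pvPassStep (i B : Int) (st : List Int × List Int × Int) (_v : Int) : List Int × List Int × Int :=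
  let r := (List.range i.toNat).foldl (pvInnerStep st.1 i B) (st.2.1, st.2.2)
  (r.1, r.1, r.2)

def proord (A : List Int) (c : Int) (s : Int) (w : Int) (x : Int) : List Int :=
  let i : Int := A.length
  let B := s
  -- Python: j = math.floor(i/2) - 1 if i even, else 'Math.floor(i/2)' which raises NameError
  -- (odd lengths are excluded by Pre_proord; the value written here for the odd branch is never claimed)
  let j : Int := if PySem.Int.mod i 2 = 0 then PySem.Int.floordiv i 2 - 1 else PySem.Int.floordiv i 2
  -- for u in range(i): z.insert(u, 0)   — builds [0]*i
  let z : List Int := List.replicate i.toNat 0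
  let st := (PySem.List.pyRange c j 1).foldl (pvPassStep i B) (A, z, 0)
  let A1 := st.1
  let z1 := st.2.1
  let A2 :=
    if (i = 3 ∧ s = 2) ∨ (i = 4 ∧ s = 3) ∨ (i = 7 ∧ s = 6) ∨ (i = 8 ∧ s = 7) ∨ (i = 12 ∧ s = 11) ∨
       (i = 15 ∧ s = 14) ∨ (i = 16 ∧ s = 15) ∨ (i = 19 ∧ s = 18) ∨ (i = 20 ∧ s = 19) then
      -- for u in range(i): z[u] = 0; z[u] = A[u]
      let z2 := (List.range i.toNat).foldl (fun zc u => (zc.set u 0).set u (pvIdx A1 u)) z1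
      -- k = 0; for t in range(i-1, -1, -1): A[k] = z[t]; k = k + 1
      ((PySem.List.pyRange (i - 1) (-1) (-1)).foldl
        (fun (st2 : List Int × Int) t => (st2.1.set st2.2.toNat (pvIdx z2 t), st2.2 + 1)) (A1, (0 : Int))).1
    else A1
  let A3 :=
    if (i = 3 ∧ s = 1) ∨ (i = 4 ∧ s = 1) then
      -- for u in range(i): z[u] = A[u]
      let z3 := (List.range i.toNat).foldl (fun zc u => zc.set u (pvIdx A2 u)) z1
      -- k = 0; A[0] = z[i-1]; for t in range(1, i): A[t] = z[t-1]
      let A' := A2.set 0 (pvIdx z3 (i - 1))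
      (PySem.List.pyRange 1 i 1).foldl (fun Ac t => Ac.set t.toNat (pvIdx z3 (t - 1))) A'
    else A2
  A3

-- ===== PORT B =====
-- p, q = (p*s) % i, (p*s + q) % i
def pvPqStep (i s : Int) (pq : Int × Int) (_t : Nat) : Int × Int :=
  (PySem.Int.mod (pq.1 * s) i, PySem.Int.mod (pq.1 * s + pq.2) i)

def proord_alt (A : List Int) (c : Int) (s : Int) (w : Int) (x : Int) : List Int :=
  let i : Int := A.length
  let j : Int := if PySem.Int.mod i 2 = 0 then PySem.Int.floordiv i 2 - 1 else PySem.Int.floordiv i 2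
  let k : Int := max 0 (j - c)
  let A1 :=
    if 0 < i ∧ 0 < k then
      let pq := (List.range k.toNat).foldl (pvPqStep i s) (1, 0)
      -- A[:] = [A[(p*t+q) % i] for t in range(i)]
      (List.range i.toNat).map (fun t : Nat => pvIdx A (PySem.Int.mod (pq.1 * (t : Int) + pq.2) i))
    else A
  let A2 :=
    if (i = 4 ∧ s = 3) ∨ (i = 8 ∧ s = 7) ∨ (i = 12 ∧ s = 11) ∨ (i = 16 ∧ s = 15) ∨ (i = 20 ∧ s = 19) then
      A1.reverse
    else A1
  -- A[:] = A[-1:] + A[:-1]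
  if i = 4 ∧ s = 1 then PySem.List.slice A2 (some (-1)) none ++ PySem.List.slice A2 none (some (-1)) else A2

-- ===== PRECONDITION & SPEC =====
-- Pre_proord is exactly where the Python A returns normally: an odd length raises NameError
-- ('Math.floor' is undefined), and when the rotation loop runs at least once (c < len/2 - 1) a step s
-- outside [0, len] raises IndexError — except s = -1 with exactly one pass, which returns and is kept.
def Pre_proord (A : List Int) (c : Int) (s : Int) (w : Int) (x : Int) : Prop :=
  (A.length : Int) % 2 = 0 ∧
  (A = [] ∨ (A.length : Int) / 2 - 1 ≤ c ∨ (0 ≤ s ∧ s ≤ (A.length : Int)) ∨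
   (s = -1 ∧ (A.length : Int) / 2 - 1 = c + 1))
instance (A : List Int) (c : Int) (s : Int) (w : Int) (x : Int) : Decidable (Pre_proord A c s w x) := by
  unfold Pre_proord; infer_instance

def pvWitness_proord : List Int × Int × Int × Int × Int := ([1, 2, 3, 4, 5, 6], 0, 2, 0, 0)

def Spec_proord (A : List Int) (c : Int) (s : Int) (w : Int) (x : Int) (out : List Int) : Prop := out = proord_alt A c s w x
instance (A : List Int) (c : Int) (s : Int) (w : Int) (x : Int) (out : List Int) : Decidable (Spec_proord A c s w x out) := by unfold Spec_proord; infer_instance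

-- ===== CLAIM (what is proved, stated in full; the proofs are below) =====
def Claim_equal_proord : Prop := ∀ (A : List Int) (c : Int) (s : Int) (w : Int) (x : Int), Dom_proord A c s w x → Pre_proord A c s w x → Spec_proord A c s w x (proord A c s w x)

-- ===== LEMMAS AND PROOFS =====

-- pvIdx at a Nat index
lemma pv_idx_natCast (xs : List Int) (u : Nat) : pvIdx xs (u : Int) = xs.getD u 0 := by
  simp [pvIdx, PySem.List.pyGet?_natCast, List.getD_eq_getElem?_getD]

lemma pv_idx_eq_getD (xs : List Int) (m : Int) (h0 : 0 ≤ m) :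
    pvIdx xs m = xs.getD m.toNat 0 := by
  conv_lhs => rw [show m = ((m.toNat : Nat) : Int) by omega]
  rw [pv_idx_natCast]

lemma pv_map_getD_self (xs : List Int) :
    (List.range xs.length).map (fun t => xs.getD t 0) = xs := by
  apply List.ext_getElem?
  intro m
  by_cases h : m < xs.length
  · simp [h, List.getD_eq_getElem?_getD]
  · simp [h, List.getElem?_eq_none_iff.2 (show xs.length ≤ m by omega)]

lemma pv_setFold_getElem? (g : Nat → Int) :
    ∀ (L : List Nat) (A0 : List Int) (m : Nat),
    (L.foldl (fun Ac t => Ac.set t (g t)) A0)[m]? =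
      if m ∈ L ∧ m < A0.length then some (g m) else A0[m]? := by
  intro L
  induction L with
  | nil => intro A0 m; simp
  | cons t L ih =>
    intro A0 m
    rw [List.foldl_cons, ih, List.length_set]
    by_cases hm : m ∈ L
    · by_cases hlen : m < A0.length
      · simp [hm, hlen]
      · simp [hm, hlen, List.getElem?_set, show ¬ (t = m ∧ t < A0.length) from by
          rintro ⟨rfl, h⟩; omega]
    · by_cases ht : m = t
      · subst ht
        by_cases hlen : m < A0.length
        · simp [hm, hlen, List.getElem?_set]
        · simp [hm, hlen, List.getElem?_set, show ¬ (m < A0.length) from hlen]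
      · simp [hm, ht, List.getElem?_set, show t ≠ m from fun h => ht h.symm]

lemma pv_setFold_range_map (g : Nat → Int) (n : Nat) (A0 : List Int) (h : A0.length = n) :
    (List.range n).foldl (fun Ac t => Ac.set t (g t)) A0 = (List.range n).map g := by
  apply List.ext_getElem?
  intro m
  rw [pv_setFold_getElem?]
  by_cases hm : m < n
  · simp [List.mem_range, hm, h]
  · have h1 : A0[m]? = none := List.getElem?_eq_none_iff.2 (by omega)
    have h2 : ((List.range n).map g)[m]? = none := List.getElem?_eq_none_iff.2 (by simp; omega)
    simp [List.mem_range, hm, h1, h2]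

lemma pv_copy (X z0 : List Int) (h : z0.length = X.length) :
    (List.range X.length).foldl (fun zc u => zc.set u (pvIdx X u)) z0 = X := by
  rw [pv_setFold_range_map _ _ _ h,
    List.map_congr_left (fun u _ => pv_idx_natCast X u), pv_map_getD_self]

lemma pv_mod_emod (a i : Int) : a % i % i = a % i := Int.emod_emod_of_dvd a dvd_rfl

lemma pv_mod_absorb (p a q i : Int) : (p * (a % i) + q) % i = (p * a + q) % i :=
  Int.ModEq.add_right q (Int.ModEq.mul_left p (pv_mod_emod a i))

lemma pv_mod_affine (a b t i : Int) : (a % i * t + b % i) % i = (a * t + b) % i :=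
  Int.ModEq.add (Int.ModEq.mul_right t (pv_mod_emod a i)) (pv_mod_emod b i)

-- the once-only wraparound equals true mod when 0 ≤ a < i and 0 ≤ B ≤ i
lemma pv_step_mod (a B i : Int) (h0 : 0 ≤ a) (h1 : a < i) (hB0 : 0 ≤ B) (hBi : B ≤ i) :
    (if i ≤ a + B then a + B - i else a + B) = (a + B) % i := by
  split_ifs with h
  · have e1 : (a + B) % i = (a + B - i) % i := by
      conv_lhs => rw [show a + B = (a + B - i) + i * 1 by ring]
      rw [Int.add_mul_emod_self_left]
    rw [e1, Int.emod_eq_of_lt (by omega) (by omega)]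
  · rw [Int.emod_eq_of_lt (by omega) (by omega)]

lemma pv_inner_go (Acur : List Int) (i B : Int) (h0 : 0 < i) (hB0 : 0 ≤ B) (hBi : B ≤ i) :
    ∀ (n m : Nat) (z0 : List Int),
    (List.range' m n).foldl (pvInnerStep Acur i B) (z0, ((m : Int) * B) % i) =
      ((List.range' m n).foldl (fun zc t => zc.set t (pvIdx Acur (((t : Int) + 1) * B % i))) z0,
        (((m : Int) + (n : Int)) * B) % i) := by
  intro n
  induction n with
  | zero => intro m z0; simp
  | succ n ih =>
    intro m z0
    rw [List.range'_succ, List.foldl_cons, List.foldl_cons]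
    have hy : pvInnerStep Acur i B (z0, ((m : Int) * B) % i) m =
        (z0.set m (pvIdx Acur (((m : Int) + 1) * B % i)), (((m : Int) + 1) * B) % i) := by
      simp only [pvInnerStep]
      have hc : (if i ≤ (m : Int) * B % i + B then (m : Int) * B % i + B - i
          else (m : Int) * B % i + B) = ((m : Int) * B % i + B) % i :=
        pv_step_mod _ _ _ (Int.emod_nonneg _ (by omega)) (Int.emod_lt_of_pos _ h0) hB0 hBi
      have he : ((m : Int) * B % i + B) % i = (((m : Int) + 1) * B) % i := by
        rw [Int.emod_add_emod, show (m : Int) * B + B = ((m : Int) + 1) * B by ring]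
      rw [hc, he]
    rw [hy]
    have h2 : ((m : Int) + 1) * B % i = (((m + 1 : Nat) : Int)) * B % i := by push_cast; ring_nf
    rw [h2, ih (m + 1) _]
    congr 2
    push_cast
    ring

-- one pass of the main loop as a permutation read-off
def pvOnepass (i B : Int) (Acur : List Int) : List Int :=
  (List.range i.toNat).map (fun t : Nat => pvIdx Acur (((t : Int) + 1) * B % i))

lemma pv_onepass_length (i B : Int) (Acur : List Int) :
    (pvOnepass i B Acur).length = i.toNat := by simp [pvOnepass]

lemma pv_pass_eq (i B : Int) (h0 : 0 < i) (hB0 : 0 ≤ B) (hBi : B ≤ i)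
    (Acur z0 : List Int) (hz : z0.length = i.toNat) (v : Int) :
    pvPassStep i B (Acur, z0, 0) v = (pvOnepass i B Acur, pvOnepass i B Acur, 0) := by
  simp only [pvPassStep]
  have h1 : (0 : Int) = ((0 : Nat) : Int) * B % i := by simp
  rw [show (List.range i.toNat) = List.range' 0 i.toNat from List.range_eq_range']
  conv_lhs => rw [h1]
  rw [pv_inner_go Acur i B h0 hB0 hBi i.toNat 0 z0]
  rw [show List.range' 0 i.toNat = List.range i.toNat from List.range_eq_range'.symm]
  rw [pv_setFold_range_map _ _ _ hz]
  have hy : ((0 : Nat) + (i.toNat : Int)) * B % i = 0 := by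
    rw [Int.toNat_of_nonneg (le_of_lt h0)]
    simp [Int.mul_emod_right]
  rw [hy]
  rfl

lemma pv_outer_same (i B : Int) (h0 : 0 < i) (hB0 : 0 ≤ B) (hBi : B ≤ i) :
    ∀ (L : List Int) (A0 : List Int), A0.length = i.toNat →
    L.foldl (pvPassStep i B) (A0, A0, 0) =
      ((pvOnepass i B)^[L.length] A0, (pvOnepass i B)^[L.length] A0, 0) := by
  intro L
  induction L with
  | nil => intro A0 _; simp
  | cons v L ih =>
    intro A0 hA
    rw [List.foldl_cons, pv_pass_eq i B h0 hB0 hBi A0 A0 hA v,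
      ih (pvOnepass i B A0) (pv_onepass_length i B A0)]
    rw [List.length_cons, Function.iterate_succ_apply]

lemma pv_outer (i B : Int) (h0 : 0 < i) (hB0 : 0 ≤ B) (hBi : B ≤ i)
    (L : List Int) (v : Int) (A0 z0 : List Int) (hz : z0.length = i.toNat) :
    (v :: L).foldl (pvPassStep i B) (A0, z0, 0) =
      ((pvOnepass i B)^[L.length + 1] A0, (pvOnepass i B)^[L.length + 1] A0, 0) := by
  rw [List.foldl_cons, pv_pass_eq i B h0 hB0 hBi A0 z0 hz v,
    pv_outer_same i B h0 hB0 hBi L (pvOnepass i B A0) (pv_onepass_length i B A0),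
    Function.iterate_succ_apply]

lemma pv_pqf_succ (i s : Int) (k : Nat) :
    (List.range (k + 1)).foldl (pvPqStep i s) (1, 0) =
      pvPqStep i s ((List.range k).foldl (pvPqStep i s) (1, 0)) k := by
  rw [List.range_succ, List.foldl_append, List.foldl_cons, List.foldl_nil]

lemma pv_idx_map (g : Nat → Int) (n : Nat) (u : Int) (h0 : 0 ≤ u) (hu : u < (n : Int)) :
    pvIdx ((List.range n).map g) u = g u.toNat := by
  rw [pv_idx_eq_getD _ _ h0]
  have h1 : u.toNat < n := by omega
  simp [List.getD_eq_getElem?_getD, List.getElem?_map, List.getElem?_range, h1]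

lemma pv_closed (i s : Int) (h0 : 0 < i) (hs0 : 0 ≤ s) (hsi : s ≤ i) :
    ∀ (k : Nat) (A0 : List Int), A0.length = i.toNat →
    (pvOnepass i s)^[k] A0 =
      (List.range i.toNat).map (fun t : Nat =>
        pvIdx A0 ((((List.range k).foldl (pvPqStep i s) (1, 0)).1 * (t : Int) +
                   ((List.range k).foldl (pvPqStep i s) (1, 0)).2) % i)) := by
  intro k
  induction k with
  | zero =>
    intro A0 hA
    simp only [Function.iterate_zero, id_eq, List.range_zero, List.foldl_nil]
    rw [List.map_congr_left (g := fun t : Nat => A0.getD t 0) ?_]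
    · rw [← hA, pv_map_getD_self]
    · intro t ht
      rw [List.mem_range] at ht
      have h1 : (1 : Int) * (t : Int) + 0 = (t : Int) := by ring
      have h2 : ((t : Int)) % i = (t : Int) := Int.emod_eq_of_lt (by omega) (by omega)
      rw [h1, h2, pv_idx_natCast A0 t]
  | succ k ih =>
    intro A0 hA
    rw [Function.iterate_succ_apply', ih A0 hA, pv_pqf_succ]
    set p := ((List.range k).foldl (pvPqStep i s) (1, 0)).1 with hp
    set q := ((List.range k).foldl (pvPqStep i s) (1, 0)).2 with hq
    simp only [pvOnepass, pvPqStep]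
    apply List.map_congr_left
    intro t ht
    rw [List.mem_range] at ht
    have hti : ((i.toNat : Nat) : Int) = i := Int.toNat_of_nonneg (by omega)
    have hin : 0 ≤ ((t : Int) + 1) * s % i ∧ ((t : Int) + 1) * s % i < i :=
      ⟨Int.emod_nonneg _ (by omega), Int.emod_lt_of_pos _ h0⟩
    rw [pv_idx_map _ _ _ hin.1 (by rw [hti]; exact hin.2)]
    have hcast : ((((t : Int) + 1) * s % i).toNat : Int) = ((t : Int) + 1) * s % i :=
      Int.toNat_of_nonneg hin.1
    rw [hcast]
    have e1 : (p * (((t : Int) + 1) * s % i) + q) % i = (p * (((t : Int) + 1) * s) + q) % i :=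
      pv_mod_absorb p _ q i
    have e2 : (p * (((t : Int) + 1) * s) + q) % i = ((p * s) * (t : Int) + (p * s + q)) % i := by
      ring_nf
    have e3 : ((p * s) % i * (t : Int) + (p * s + q) % i) % i =
        ((p * s) * (t : Int) + (p * s + q)) % i := pv_mod_affine _ _ _ i
    rw [PySem.Int.mod_eq_emod_of_pos h0, PySem.Int.mod_eq_emod_of_pos h0, e3, ← e2, ← e1]

-- the s = -1 single-pass corner: y decreases 0, -1, -2, …; the wraparound branch never fires
lemma pv_inner_neg (Acur : List Int) (i : Int) (hi : 0 ≤ i) :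
    ∀ (n m : Nat) (z0 : List Int),
    (List.range' m n).foldl (pvInnerStep Acur i (-1)) (z0, -(m : Int)) =
      ((List.range' m n).foldl (fun zc t => zc.set t (pvIdx Acur (-((t : Int) + 1)))) z0,
        -((m : Int) + (n : Int))) := by
  intro n
  induction n with
  | zero => intro m z0; simp
  | succ n ih =>
    intro m z0
    rw [List.range'_succ, List.foldl_cons, List.foldl_cons]
    have hy : pvInnerStep Acur i (-1) (z0, -(m : Int)) m =
        (z0.set m (pvIdx Acur (-((m : Int) + 1))), -((m : Int) + 1)) := by
      simp only [pvInnerStep]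
      have hc : ¬ (i ≤ -(m : Int) + -1) := by omega
      rw [if_neg hc, show -(m : Int) + -1 = -((m : Int) + 1) by ring]
    rw [hy]
    have h2 : -((m : Int) + 1) = -(((m + 1 : Nat) : Int)) := by push_cast; ring
    rw [h2, ih (m + 1) _]
    congr 2
    push_cast
    ring

lemma pv_pass_neg (i : Int) (h0 : 0 < i) (Acur z0 : List Int) (hz : z0.length = i.toNat) (v : Int) :
    pvPassStep i (-1) (Acur, z0, 0) v =
      ((List.range i.toNat).map (fun t : Nat => pvIdx Acur (-((t : Int) + 1))),
       (List.range i.toNat).map (fun t : Nat => pvIdx Acur (-((t : Int) + 1))),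
       -(((0 : Nat) : Int) + (i.toNat : Int))) := by
  simp only [pvPassStep]
  rw [show (List.range i.toNat) = List.range' 0 i.toNat from List.range_eq_range']
  conv_lhs => rw [show (0 : Int) = -(((0 : Nat) : Int)) by simp]
  rw [pv_inner_neg Acur i (le_of_lt h0) i.toNat 0 z0]
  rw [show List.range' 0 i.toNat = List.range i.toNat from List.range_eq_range'.symm]
  rw [pv_setFold_range_map _ _ _ hz]

lemma pv_idx_neg (xs : List Int) (t : Nat) (h : t < xs.length) :
    pvIdx xs (-((t : Int) + 1)) = xs.getD (xs.length - (t + 1)) 0 := by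
  have h1 : 0 < t + 1 := by omega
  have h2 : t + 1 ≤ xs.length := by omega
  have hc : -((t : Int) + 1) = -(((t + 1 : Nat) : Int)) := by push_cast; ring
  rw [pvIdx, hc, PySem.List.pyGet?_neg_natCast xs (t + 1) h1 h2, List.getD_eq_getElem?_getD]

lemma pv_neg_mod (i : Int) (t : Nat) (h0 : 0 < i) (ht : (t : Int) < i) :
    (-((t : Int) + 1)) % i = i - ((t : Int) + 1) := by
  have e1 : (-((t : Int) + 1)) % i = (i - ((t : Int) + 1)) % i := by
    conv_lhs => rw [show -((t : Int) + 1) = (i - ((t : Int) + 1)) + i * (-1) by ring]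
    rw [Int.add_mul_emod_self_left]
  rw [e1, Int.emod_eq_of_lt (by omega) (by omega)]

lemma pv_ctrFold_getElem? (z : List Int) :
    ∀ (L : List Int) (A0 : List Int) (k0 : Nat) (m : Nat),
    ((L.foldl (fun (st2 : List Int × Int) t => (st2.1.set st2.2.toNat (pvIdx z t), st2.2 + 1))
        (A0, (k0 : Int))).1)[m]? =
      if k0 ≤ m ∧ m < k0 + L.length ∧ m < A0.length then some (pvIdx z (L.getD (m - k0) 0))
      else A0[m]? := by
  intro L
  induction L with
  | nil =>
    intro A0 k0 m
    simp only [List.foldl_nil, List.length_nil, Nat.add_zero]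
    rw [if_neg (by omega)]
  | cons t L ih =>
    intro A0 k0 m
    rw [List.foldl_cons]
    have hc : ((k0 : Int)).toNat = k0 := by omega
    have hc2 : (k0 : Int) + 1 = ((k0 + 1 : Nat) : Int) := by push_cast; ring
    rw [hc, hc2, ih (A0.set k0 (pvIdx z t)) (k0 + 1) m, List.length_set]
    by_cases h1 : k0 + 1 ≤ m ∧ m < (k0 + 1) + L.length ∧ m < A0.length
    · rw [if_pos h1, if_pos (by simp only [List.length_cons]; omega : k0 ≤ m ∧ m < k0 + (t :: L).length ∧ m < A0.length)]
      have : (t :: L).getD (m - k0) 0 = L.getD (m - (k0 + 1)) 0 := by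
        have e : m - k0 = (m - (k0 + 1)) + 1 := by omega
        rw [e]
        rfl
      rw [this]
    · rw [if_neg h1, List.getElem?_set]
      by_cases h2 : m = k0 ∧ m < A0.length
      · rw [if_pos (by simp only [List.length_cons]; omega : k0 ≤ m ∧ m < k0 + (t :: L).length ∧ m < A0.length)]
        have e : m - k0 = 0 := by omega
        rw [e]
        simp [h2.1.symm, h2.2]
      · rw [if_neg (by simp only [List.length_cons]; omega : ¬ (k0 ≤ m ∧ m < k0 + (t :: L).length ∧ m < A0.length))]
        by_cases h3 : k0 = m
        · simp [h3, show ¬ (m < A0.length) from by omega]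
        · simp [h3]

lemma pv_revBlock (z A0 : List Int) (hz : z.length = A0.length) :
    ((PySem.List.pyRange ((A0.length : Int) - 1) (-1) (-1)).foldl
      (fun (st2 : List Int × Int) t => (st2.1.set st2.2.toNat (pvIdx z t), st2.2 + 1))
      (A0, (0 : Int))).1 = z.reverse := by
  have hR : PySem.List.pyRange ((A0.length : Int) - 1) (-1) (-1) =
      (List.range A0.length).map (fun k : Nat => ((A0.length : Int) - 1 - (k : Int))) := by
    rw [PySem.List.pyRange_neg_one]
    have e : ((A0.length : Int) - 1 - (-1)).toNat = A0.length := by omega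
    rw [e]
  apply List.ext_getElem?
  intro m
  rw [show ((0 : Int)) = (((0 : Nat)) : Int) by simp, pv_ctrFold_getElem?, hR]
  by_cases hm : m < A0.length
  · have hlen : ((List.range A0.length).map
        (fun k : Nat => ((A0.length : Int) - 1 - (k : Int)))).length = A0.length := by simp
    rw [if_pos (by simp only [List.length_map, List.length_range]; omega : 0 ≤ m ∧ m < 0 + ((List.range A0.length).map
        (fun k : Nat => ((A0.length : Int) - 1 - (k : Int)))).length ∧ m < A0.length)]
    have hget : ((List.range A0.length).map
        (fun k : Nat => ((A0.length : Int) - 1 - (k : Int)))).getD (m - 0) 0 =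
        (A0.length : Int) - 1 - (m : Int) := by
      simp [List.getD_eq_getElem?_getD, List.getElem?_map, List.getElem?_range, hm]
    rw [hget]
    have hidx : pvIdx z ((A0.length : Int) - 1 - (m : Int)) = z.getD (A0.length - 1 - m) 0 := by
      rw [pv_idx_eq_getD _ _ (by omega)]
      congr 1
      omega
    rw [hidx]
    have hrev : z.reverse[m]? = some (z.getD (A0.length - 1 - m) 0) := by
      have hmz : m < z.reverse.length := by simp only [List.length_reverse]; omega
      have h5 : A0.length - 1 - m = z.length - 1 - m := by omega
      rw [List.getElem?_eq_getElem hmz, List.getElem_reverse, h5,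
        List.getD_eq_getElem?_getD, List.getElem?_eq_getElem (show z.length - 1 - m < z.length by omega)]
      simp
    rw [hrev]
  · rw [if_neg (by simp only [List.length_map, List.length_range]; omega : ¬ (0 ≤ m ∧ m < 0 + ((List.range A0.length).map
        (fun k : Nat => ((A0.length : Int) - 1 - (k : Int)))).length ∧ m < A0.length))]
    · rw [List.getElem?_eq_none_iff.2 (by omega), List.getElem?_eq_none_iff.2 (by simp [hz]; omega)]

lemma pv_outer_nil (B : Int) : ∀ (L : List Int) (y : Int),
    L.foldl (pvPassStep 0 B) (([] : List Int), ([] : List Int), y) = ([], [], y) := by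
  intro L
  induction L with
  | nil => intro y; simp
  | cons v L ih => intro y; rw [List.foldl_cons]; exact ih y

lemma pv_block1 (X z1 : List Int) (i : Int) (hi : i = (X.length : Int)) (hz : z1.length = X.length) :
    ((PySem.List.pyRange (i - 1) (-1) (-1)).foldl
      (fun (st2 : List Int × Int) t =>
        (st2.1.set st2.2.toNat
          (pvIdx ((List.range i.toNat).foldl (fun zc u => (zc.set u 0).set u (pvIdx X u)) z1) t),
         st2.2 + 1)) (X, (0 : Int))).1 = X.reverse := by
  have hfun : (fun (zc : List Int) (u : Nat) => (zc.set u 0).set u (pvIdx X u)) =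
      (fun (zc : List Int) (u : Nat) => zc.set u (pvIdx X u)) := by
    funext zc u
    rw [List.set_set]
  have htn : i.toNat = X.length := by omega
  have hcopy : (List.range i.toNat).foldl (fun zc u => (zc.set u 0).set u (pvIdx X u)) z1 = X := by
    rw [hfun, htn, pv_copy X z1 hz]
  rw [hcopy, hi, pv_revBlock X X rfl]

-- the two special-case blocks agree once the main loop results agree (i is even under Pre_)
lemma pv_tail (s i : Int) (X z1 : List Int) (hi : i = (X.length : Int)) (heven : i % 2 = 0)
    (hz : z1.length = X.length) :
    (if (i = 3 ∧ s = 1) ∨ (i = 4 ∧ s = 1) then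
      (PySem.List.pyRange 1 i 1).foldl
        (fun Ac t => Ac.set t.toNat (pvIdx ((List.range i.toNat).foldl
          (fun zc u => zc.set u (pvIdx (if (i = 3 ∧ s = 2) ∨ (i = 4 ∧ s = 3) ∨ (i = 7 ∧ s = 6) ∨ (i = 8 ∧ s = 7) ∨ (i = 12 ∧ s = 11) ∨ (i = 15 ∧ s = 14) ∨ (i = 16 ∧ s = 15) ∨ (i = 19 ∧ s = 18) ∨ (i = 20 ∧ s = 19) then
            ((PySem.List.pyRange (i - 1) (-1) (-1)).foldl
              (fun (st2 : List Int × Int) t =>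
                (st2.1.set st2.2.toNat (pvIdx ((List.range i.toNat).foldl (fun zc u => (zc.set u 0).set u (pvIdx X u)) z1) t), st2.2 + 1)) (X, (0 : Int))).1
          else X) u)) z1) (t - 1)))
        ((if (i = 3 ∧ s = 2) ∨ (i = 4 ∧ s = 3) ∨ (i = 7 ∧ s = 6) ∨ (i = 8 ∧ s = 7) ∨ (i = 12 ∧ s = 11) ∨ (i = 15 ∧ s = 14) ∨ (i = 16 ∧ s = 15) ∨ (i = 19 ∧ s = 18) ∨ (i = 20 ∧ s = 19) then
            ((PySem.List.pyRange (i - 1) (-1) (-1)).foldl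
              (fun (st2 : List Int × Int) t =>
                (st2.1.set st2.2.toNat (pvIdx ((List.range i.toNat).foldl (fun zc u => (zc.set u 0).set u (pvIdx X u)) z1) t), st2.2 + 1)) (X, (0 : Int))).1
          else X).set 0 (pvIdx ((List.range i.toNat).foldl
          (fun zc u => zc.set u (pvIdx (if (i = 3 ∧ s = 2) ∨ (i = 4 ∧ s = 3) ∨ (i = 7 ∧ s = 6) ∨ (i = 8 ∧ s = 7) ∨ (i = 12 ∧ s = 11) ∨ (i = 15 ∧ s = 14) ∨ (i = 16 ∧ s = 15) ∨ (i = 19 ∧ s = 18) ∨ (i = 20 ∧ s = 19) then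
            ((PySem.List.pyRange (i - 1) (-1) (-1)).foldl
              (fun (st2 : List Int × Int) t =>
                (st2.1.set st2.2.toNat (pvIdx ((List.range i.toNat).foldl (fun zc u => (zc.set u 0).set u (pvIdx X u)) z1) t), st2.2 + 1)) (X, (0 : Int))).1
          else X) u)) z1) (i - 1)))
    else
      (if (i = 3 ∧ s = 2) ∨ (i = 4 ∧ s = 3) ∨ (i = 7 ∧ s = 6) ∨ (i = 8 ∧ s = 7) ∨ (i = 12 ∧ s = 11) ∨ (i = 15 ∧ s = 14) ∨ (i = 16 ∧ s = 15) ∨ (i = 19 ∧ s = 18) ∨ (i = 20 ∧ s = 19) then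
        ((PySem.List.pyRange (i - 1) (-1) (-1)).foldl
          (fun (st2 : List Int × Int) t =>
            (st2.1.set st2.2.toNat (pvIdx ((List.range i.toNat).foldl (fun zc u => (zc.set u 0).set u (pvIdx X u)) z1) t), st2.2 + 1)) (X, (0 : Int))).1
      else X))
    =
    (if i = 4 ∧ s = 1 then
      PySem.List.slice (if (i = 4 ∧ s = 3) ∨ (i = 8 ∧ s = 7) ∨ (i = 12 ∧ s = 11) ∨ (i = 16 ∧ s = 15) ∨ (i = 20 ∧ s = 19) then X.reverse else X) (some (-1)) none ++
      PySem.List.slice (if (i = 4 ∧ s = 3) ∨ (i = 8 ∧ s = 7) ∨ (i = 12 ∧ s = 11) ∨ (i = 16 ∧ s = 15) ∨ (i = 20 ∧ s = 19) then X.reverse else X) none (some (-1))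
    else
      (if (i = 4 ∧ s = 3) ∨ (i = 8 ∧ s = 7) ∨ (i = 12 ∧ s = 11) ∨ (i = 16 ∧ s = 15) ∨ (i = 20 ∧ s = 19) then X.reverse else X)) := by
  by_cases hg2 : i = 4 ∧ s = 1
  · obtain ⟨hi4, hs1⟩ := hg2
    subst hi4 hs1
    have hGAf : ¬ (((4:Int) = 3 ∧ (1:Int) = 2) ∨ ((4:Int) = 4 ∧ (1:Int) = 3) ∨ ((4:Int) = 7 ∧ (1:Int) = 6) ∨ ((4:Int) = 8 ∧ (1:Int) = 7) ∨ ((4:Int) = 12 ∧ (1:Int) = 11) ∨ ((4:Int) = 15 ∧ (1:Int) = 14) ∨ ((4:Int) = 16 ∧ (1:Int) = 15) ∨ ((4:Int) = 19 ∧ (1:Int) = 18) ∨ ((4:Int) = 20 ∧ (1:Int) = 19)) := by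
      rintro (⟨h1, h2⟩|⟨h1, h2⟩|⟨h1, h2⟩|⟨h1, h2⟩|⟨h1, h2⟩|⟨h1, h2⟩|⟨h1, h2⟩|⟨h1, h2⟩|⟨h1, h2⟩) <;> omega
    have hGBf : ¬ (((4:Int) = 4 ∧ (1:Int) = 3) ∨ ((4:Int) = 8 ∧ (1:Int) = 7) ∨ ((4:Int) = 12 ∧ (1:Int) = 11) ∨ ((4:Int) = 16 ∧ (1:Int) = 15) ∨ ((4:Int) = 20 ∧ (1:Int) = 19)) := by
      rintro (⟨h1, h2⟩|⟨h1, h2⟩|⟨h1, h2⟩|⟨h1, h2⟩|⟨h1, h2⟩) <;> omega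
    rw [if_neg hGAf, if_pos (Or.inr ⟨rfl, rfl⟩), if_pos ⟨rfl, rfl⟩, if_neg hGBf]
    have hx4 : X.length = 4 := by omega
    have htn : (4 : Int).toNat = X.length := by omega
    have hcopy : (List.range (4 : Int).toNat).foldl (fun zc u => zc.set u (pvIdx X u)) z1 = X := by
      rw [htn, pv_copy X z1 hz]
    rw [hcopy]
    have hpr : PySem.List.pyRange 1 4 1 = [1, 2, 3] := by decide
    rw [hpr]
    match X, hx4 with
    | [e1, e2, e3, e4], _ => rfl
  · have hG3f : ¬ ((i = 3 ∧ s = 1) ∨ (i = 4 ∧ s = 1)) := by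
      rintro (⟨h1, h2⟩ | h)
      · omega
      · exact hg2 h
    rw [if_neg hG3f, if_neg hg2]
    by_cases hg : (i = 4 ∧ s = 3) ∨ (i = 8 ∧ s = 7) ∨ (i = 12 ∧ s = 11) ∨ (i = 16 ∧ s = 15) ∨ (i = 20 ∧ s = 19)
    · have hGA : (i = 3 ∧ s = 2) ∨ (i = 4 ∧ s = 3) ∨ (i = 7 ∧ s = 6) ∨ (i = 8 ∧ s = 7) ∨ (i = 12 ∧ s = 11) ∨ (i = 15 ∧ s = 14) ∨ (i = 16 ∧ s = 15) ∨ (i = 19 ∧ s = 18) ∨ (i = 20 ∧ s = 19) := by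
        rcases hg with h | h | h | h | h
        · exact Or.inr (Or.inl h)
        · exact Or.inr (Or.inr (Or.inr (Or.inl h)))
        · exact Or.inr (Or.inr (Or.inr (Or.inr (Or.inl h))))
        · exact Or.inr (Or.inr (Or.inr (Or.inr (Or.inr (Or.inr (Or.inl h))))))
        · exact Or.inr (Or.inr (Or.inr (Or.inr (Or.inr (Or.inr (Or.inr (Or.inr h)))))))
      rw [if_pos hGA, if_pos hg, pv_block1 X z1 i hi hz]
    · have hGAf : ¬ ((i = 3 ∧ s = 2) ∨ (i = 4 ∧ s = 3) ∨ (i = 7 ∧ s = 6) ∨ (i = 8 ∧ s = 7) ∨ (i = 12 ∧ s = 11) ∨ (i = 15 ∧ s = 14) ∨ (i = 16 ∧ s = 15) ∨ (i = 19 ∧ s = 18) ∨ (i = 20 ∧ s = 19)) := by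
        rintro (⟨h1, h2⟩|h|⟨h1, h2⟩|h|h|⟨h1, h2⟩|h|⟨h1, h2⟩|h)
        · omega
        · exact hg (Or.inl h)
        · omega
        · exact hg (Or.inr (Or.inl h))
        · exact hg (Or.inr (Or.inr (Or.inl h)))
        · omega
        · exact hg (Or.inr (Or.inr (Or.inr (Or.inl h))))
        · omega
        · exact hg (Or.inr (Or.inr (Or.inr (Or.inr h))))
      rw [if_neg hGAf, if_neg hg]

theorem pv_main : ∀ (A : List Int) (c s w x : Int),
    Pre_proord A c s w x → proord A c s w x = proord_alt A c s w x := by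
  intro A c s w x hPre
  obtain ⟨heven, hcase⟩ := hPre
  have h2 : (0 : Int) < 2 := by norm_num
  simp only [proord, proord_alt, PySem.Int.mod_eq_emod_of_pos h2,
    PySem.Int.floordiv_eq_ediv_of_pos h2, heven, ite_true]
  by_cases hnil : A = []
  · subst hnil
    simp only [List.length_nil, Nat.cast_zero, Int.toNat_zero, List.replicate_zero]
    rw [pv_outer_nil s _ 0]
    norm_num
  · by_cases hk0 : (A.length : Int) / 2 - 1 ≤ c
    · rw [PySem.List.pyRange_one_eq_nil hk0]
      simp only [List.foldl_nil]
      rw [show max (0 : Int) ((A.length : Int) / 2 - 1 - c) = 0 from by omega]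
      simp only [lt_self_iff_false, and_false, ite_false]
      exact pv_tail s ((A.length : Int)) A (List.replicate ((A.length : Int)).toNat 0) rfl heven
        (by simp only [List.length_replicate]; omega)
    · have h0i : 0 < (A.length : Int) := by
        have : A.length ≠ 0 := fun h => hnil (List.length_eq_zero_iff.1 h)
        omega
      have hz0 : (List.replicate ((A.length : Int)).toNat (0 : Int)).length = ((A.length : Int)).toNat := by
        simp
      rcases hcase with hnil' | hk0' | ⟨hs0, hsi⟩ | ⟨hsneg, hj⟩
      · exact absurd hnil' hnil
      · exact absurd hk0' hk0
      · -- generic case 0 ≤ s ≤ len(A)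
        rw [PySem.List.pyRange_one_cons (show c < (A.length : Int) / 2 - 1 from by omega),
          pv_outer ((A.length : Int)) s h0i hs0 hsi _ c A _ hz0]
        rw [if_pos (⟨h0i, by omega⟩ :
          0 < (A.length : Int) ∧ 0 < max 0 ((A.length : Int) / 2 - 1 - c))]
        have hkn : (max (0 : Int) ((A.length : Int) / 2 - 1 - c)).toNat =
            (PySem.List.pyRange (c + 1) ((A.length : Int) / 2 - 1) 1).length + 1 := by
          rw [PySem.List.length_pyRange_one]
          omega
        rw [hkn]
        rw [pv_closed ((A.length : Int)) s h0i hs0 hsi _ A (by omega)]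
        simp only [PySem.Int.mod_eq_emod_of_pos h0i]
        refine pv_tail s ((A.length : Int)) _ _ ?_ heven rfl
        simp only [List.length_map, List.length_range]
        omega
      · -- corner: s = -1, exactly one pass
        subst hsneg
        rw [hj, PySem.List.pyRange_one_singleton]
        simp only [List.foldl_cons, List.foldl_nil]
        rw [pv_pass_neg ((A.length : Int)) h0i A _ hz0 c]
        rw [show max (0 : Int) (c + 1 - c) = 1 from by omega]
        rw [if_pos (⟨h0i, by norm_num⟩ : 0 < (A.length : Int) ∧ (0 : Int) < 1)]
        have hpq : (List.range ((1 : Int)).toNat).foldl (pvPqStep ((A.length : Int)) (-1)) (1, 0) =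
            ((-1) % ((A.length : Int)), (-1) % ((A.length : Int))) := by
          norm_num [pvPqStep, PySem.Int.mod_eq_emod_of_pos h0i, List.range_succ]
        rw [hpq]
        have hmap : (List.range ((A.length : Int)).toNat).map
              (fun t : Nat => pvIdx A (PySem.Int.mod
                (((-1) % ((A.length : Int))) * (t : Int) + ((-1) % ((A.length : Int))))
                ((A.length : Int)))) =
            (List.range ((A.length : Int)).toNat).map
              (fun t : Nat => pvIdx A (-((t : Int) + 1))) := by
          apply List.map_congr_left
          intro t ht
          rw [List.mem_range] at ht
          have htl : t < A.length := by omega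
          rw [PySem.Int.mod_eq_emod_of_pos h0i,
            pv_mod_affine (-1) (-1) (t : Int) ((A.length : Int)),
            show (-1 : Int) * (t : Int) + (-1) = -((t : Int) + 1) from by ring,
            pv_neg_mod ((A.length : Int)) t h0i (by omega),
            pv_idx_neg A t htl,
            pv_idx_eq_getD A _ (by omega)]
          congr 1
          omega
        rw [hmap]
        refine pv_tail (-1) ((A.length : Int)) _ _ ?_ heven rfl
        simp only [List.length_map, List.length_range]
        omega

-- ===== VERDICT (by name: the statement is the Claim_ definition above) =====
theorem proord_spec : Claim_equal_proord := by
  unfold Claim_equal_proord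
  intro A c s w x _ hPre
  unfold Spec_proord
  exact pv_main A c s w x hPre
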